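-- pv_equiv track=rewrite | github.com/nhsengland/Reusable-Code-Library | src/dsp/udfs/misc.py | is_valid_nhs_number_old
-- ===== SOURCE A (Python) =====
-- from typing import Any, Mapping, Optional, Dict
--
-- _NHS_CHECK_DIGIT_WEIGHTINGS = [10, 9, 8, 7, 6, 5, 4, 3, 2]
--
-- def _calculate_check_digit(nhs_num: str) -> Optional[int]:
--     digits = map(int, nhs_num[:9])
--
--     check_digit_sum = sum(x * y for x, y in zip(digits, _NHS_CHECK_DIGIT_WEIGHTINGS))
--
--     check_digit = 11 - (check_digit_sum % 11)
--
--     if check_digit == 11: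
--         return 0
--     elif check_digit == 10:
--         return None  # invalid check digit
--     else:
--         return check_digit
--
-- def is_valid_nhs_number_old(nhs_num: str, palindrome_check=False) -> bool:
--     if not nhs_num:
--         return False
--
--     # nhs_num = nhs_num.replace(' ', '').replace('-', '').strip()
--
--     if len(nhs_num) != 10 or not nhs_num.isdigit():
--         return False
--
--     # palindrome check - disabled by default as per https://nhsd-jira.digital.nhs.uk/browse/DSP-1888
--     if palindrome_check and nhs_num[:5] == ''.join([x for x in reversed(nhs_num[-5:])]):
--         return False
--
--     return int(nhs_num[-1]) == _calculate_check_digit(nhs_num)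
-- ===== SOURCE B (Python) =====
-- def is_valid_nhs_number_old(nhs_num: str, palindrome_check=False) -> bool:
--     if len(nhs_num) != 10 or not nhs_num.isdigit():
--         return False
--     if palindrome_check and nhs_num == nhs_num[::-1]:
--         return False
--     total = sum(int(d) * w for d, w in zip(nhs_num, range(10, 0, -1)))
--     return total % 11 == 0
-- ===== Notes on version B (the rewrite author's own statement) =====
-- stated objective: simpler
-- what changed: Folds the check digit into one weighted sum over all 10 digits (weights 10..1) tested with total % 11 == 0, removing the check-digit helper and its None/0 branching; the palindrome guard compares the whole string with its reverse instead of rebuilding the reversed last five characters.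
import Mathlib
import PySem

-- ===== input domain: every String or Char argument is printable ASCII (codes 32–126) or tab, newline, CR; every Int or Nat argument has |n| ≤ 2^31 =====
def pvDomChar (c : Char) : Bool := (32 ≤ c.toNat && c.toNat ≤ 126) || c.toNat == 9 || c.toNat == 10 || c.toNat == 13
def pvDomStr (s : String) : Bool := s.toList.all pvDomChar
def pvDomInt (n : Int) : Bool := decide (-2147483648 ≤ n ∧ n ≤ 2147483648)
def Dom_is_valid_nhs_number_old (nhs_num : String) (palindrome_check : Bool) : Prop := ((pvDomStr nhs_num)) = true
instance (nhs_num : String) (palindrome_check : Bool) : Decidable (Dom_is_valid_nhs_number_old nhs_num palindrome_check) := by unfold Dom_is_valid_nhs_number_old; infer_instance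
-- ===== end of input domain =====

-- ===== PORT A =====
-- B folds the check digit into one weighted-sum-mod-11 test over all 10 digits (objective: simpler).
def pvNhsWeightings : List Int := [10, 9, 8, 7, 6, 5, 4, 3, 2]
def pvDigitInt (c : Char) : Int := (c.toNat : Int) - 48
def pvCalculateCheckDigit (nhs_num : String) : Option Int :=
  let digits := (PySem.Str.slice nhs_num none (some 9)).toList.map pvDigitInt
  let check_digit_sum := ((digits.zip pvNhsWeightings).map (fun p => p.1 * p.2)).sum
  let check_digit := 11 - PySem.Int.mod check_digit_sum 11
  if check_digit = 11 then some 0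
  else if check_digit = 10 then none
  else some check_digit
def is_valid_nhs_number_old (nhs_num : String) (palindrome_check : Bool) : Bool :=
  if nhs_num = "" then false
  else if PySem.Str.len nhs_num ≠ 10 ∨ PySem.Str.strIsdigit nhs_num = false then false
  else if palindrome_check = true ∧
      (PySem.Str.slice nhs_num none (some 5)).toList
        = (PySem.Str.slice nhs_num (some (-5)) none).toList.reverse then false
  else
    match PySem.Str.pyGet? nhs_num (-1) with
    | some c =>
      match pvCalculateCheckDigit nhs_num with
      | some k => pvDigitInt c == k
      | none => false
    | none => false

-- ===== PORT B =====
def is_valid_nhs_number_old_alt (nhs_num : String) (palindrome_check : Bool) : Bool :=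
  if PySem.Str.len nhs_num ≠ 10 ∨ PySem.Str.strIsdigit nhs_num = false then false
  else if palindrome_check = true ∧
      some nhs_num = PySem.Str.slice? nhs_num none none (-1) then false
  else
    let total := ((nhs_num.toList.zip (PySem.List.pyRange 10 0 (-1))).map
      (fun p => pvDigitInt p.1 * p.2)).sum
    PySem.Int.mod total 11 == 0


-- ===== PRECONDITION & SPEC =====
def Spec_is_valid_nhs_number_old (nhs_num : String) (palindrome_check : Bool) (out : Bool) : Prop := out = is_valid_nhs_number_old_alt nhs_num palindrome_check
instance (nhs_num : String) (palindrome_check : Bool) (out : Bool) : Decidable (Spec_is_valid_nhs_number_old nhs_num palindrome_check out) := by unfold Spec_is_valid_nhs_number_old; infer_instance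

-- ===== CLAIM (what is proved, stated in full; the proofs are below) =====
def Claim_equal_is_valid_nhs_number_old : Prop := ∀ (nhs_num : String) (palindrome_check : Bool), Dom_is_valid_nhs_number_old nhs_num palindrome_check → Spec_is_valid_nhs_number_old nhs_num palindrome_check (is_valid_nhs_number_old nhs_num palindrome_check)

-- ===== LEMMAS AND PROOFS =====
theorem pvDigitChar (c : Char) (h : 48 ≤ c.toNat ∧ c.toNat ≤ 57) : '0' ≤ c ∧ c ≤ '9' := by
  rw [Char.le_def, Char.le_def, UInt32.le_iff_toNat_le, UInt32.le_iff_toNat_le]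
  exact h

theorem mod11 (a : Int) : PySem.Int.mod a 11 = a % 11 := by
  simp [PySem.Int.mod, Int.fmod_eq_emod]

theorem pvMain (s : String) (pc : Bool) :
    is_valid_nhs_number_old s pc = is_valid_nhs_number_old_alt s pc := by
  by_cases hg : s.toList.length = 10 ∧ s.toList.all PySem.Chars.isdigit
  case neg =>
    have hC : PySem.Str.len s ≠ 10 ∨ PySem.Str.strIsdigit s = false := by
      by_cases h10 : s.toList.length = 10
      · right
        simp [PySem.Str.strIsdigit, PySem.Chars.strIsdigit]
        intro _
        by_contra hall
        exact hg ⟨h10, by simpa using hall⟩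
      · left
        simp only [PySem.Str.len_eq]
        exact fun h => h10 (by exact_mod_cast h)
    unfold is_valid_nhs_number_old is_valid_nhs_number_old_alt
    rw [if_pos hC]
    split_ifs <;> rfl
  case pos =>
    obtain ⟨hlen, hdig⟩ := hg
    obtain ⟨c0,c1,c2,c3,c4,c5,c6,c7,c8,c9,hl⟩ :
        ∃ c0 c1 c2 c3 c4 c5 c6 c7 c8 c9, s.toList = [c0,c1,c2,c3,c4,c5,c6,c7,c8,c9] := by
      rcases hL : s.toList with _ | ⟨c0, _ | ⟨c1, _ | ⟨c2, _ | ⟨c3, _ | ⟨c4, _ | ⟨c5, _ | ⟨c6, _ | ⟨c7, _ | ⟨c8, _ | ⟨c9, _ | ⟨cx, t⟩⟩⟩⟩⟩⟩⟩⟩⟩⟩⟩ <;>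
        rw [hL] at hlen <;> simp at hlen
      exact ⟨c0,c1,c2,c3,c4,c5,c6,c7,c8,c9, rfl⟩
    rw [hl] at hdig
    simp only [List.all_cons, List.all_nil, Bool.and_true, Bool.and_eq_true] at hdig
    obtain ⟨h0, h1, h2, h3, h4, h5, h6, h7, h8, h9⟩ := hdig
    simp only [PySem.Chars.isdigit] at h0 h1 h2 h3 h4 h5 h6 h7 h8 h9
    replace h0 : 48 ≤ c0.toNat ∧ c0.toNat ≤ 57 := by simpa using h0
    replace h1 : 48 ≤ c1.toNat ∧ c1.toNat ≤ 57 := by simpa using h1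
    replace h2 : 48 ≤ c2.toNat ∧ c2.toNat ≤ 57 := by simpa using h2
    replace h3 : 48 ≤ c3.toNat ∧ c3.toNat ≤ 57 := by simpa using h3
    replace h4 : 48 ≤ c4.toNat ∧ c4.toNat ≤ 57 := by simpa using h4
    replace h5 : 48 ≤ c5.toNat ∧ c5.toNat ≤ 57 := by simpa using h5
    replace h6 : 48 ≤ c6.toNat ∧ c6.toNat ≤ 57 := by simpa using h6
    replace h7 : 48 ≤ c7.toNat ∧ c7.toNat ≤ 57 := by simpa using h7
    replace h8 : 48 ≤ c8.toNat ∧ c8.toNat ≤ 57 := by simpa using h8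
    replace h9 : 48 ≤ c9.toNat ∧ c9.toNat ≤ 57 := by simpa using h9
    have hs0 : ¬ s = "" := by
      intro h; rw [h] at hl; simp at hl
    have hC : ¬ (PySem.Str.len s ≠ 10 ∨ PySem.Str.strIsdigit s = false) := by
      rw [not_or, not_ne_iff, Bool.not_eq_false]
      refine ⟨?_, ?_⟩
      · simp [PySem.Str.len_eq, hl]
      · simp [PySem.Str.strIsdigit, PySem.Chars.strIsdigit, hl, PySem.Chars.isdigit]
        exact ⟨pvDigitChar c0 h0, pvDigitChar c1 h1, pvDigitChar c2 h2, pvDigitChar c3 h3,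
          pvDigitChar c4 h4, pvDigitChar c5 h5, pvDigitChar c6 h6, pvDigitChar c7 h7,
          pvDigitChar c8 h8, (pvDigitChar c9 h9).1, (pvDigitChar c9 h9).2⟩
    have hrev : PySem.Str.slice? s none none (-1) = some (String.ofList [c9,c8,c7,c6,c5,c4,c3,c2,c1,c0]) := by
      rw [PySem.Str.slice?_none_none_neg_one]; simp [hl]
    have hseq : (some s = PySem.Str.slice? s none none (-1)) ↔
        ([c0,c1,c2,c3,c4,c5,c6,c7,c8,c9] = [c9,c8,c7,c6,c5,c4,c3,c2,c1,c0]) := by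
      rw [hrev]
      constructor
      · intro h
        have := (Option.some.injEq _ _).mp h.symm
        rw [← hl, ← this]
        simp
      · intro h
        have : String.ofList s.toList = s := String.toList_inj.mp (by simp)
        simp only [Option.some.injEq]
        rw [← this, hl]
        exact congrArg String.ofList h
    have hS1 : (PySem.Str.slice s none (some 5)).toList = [c0,c1,c2,c3,c4] := by
      simp only [PySem.Str.toList_slice, PySem.Chars.slice_eq_listSlice, hl]
      simp [PySem.List.slice, PySem.List.clampIdx]
    have hS2 : (PySem.Str.slice s (some (-5)) none).toList = [c5,c6,c7,c8,c9] := by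
      simp only [PySem.Str.toList_slice, PySem.Chars.slice_eq_listSlice, hl]
      simp [PySem.List.slice, PySem.List.clampIdx]
    have hS9 : (PySem.Str.slice s none (some 9)).toList = [c0,c1,c2,c3,c4,c5,c6,c7,c8] := by
      simp only [PySem.Str.toList_slice, PySem.Chars.slice_eq_listSlice, hl]
      simp [PySem.List.slice, PySem.List.clampIdx]
    have hG : PySem.Str.pyGet? s (-1) = some c9 := by
      simp only [PySem.Str.pyGet?_eq, PySem.Chars.pyGet?_eq_listPyGet?, hl]
      simp [PySem.List.pyGet?, PySem.List.pyIdx?]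
    have hrl : ([c5,c6,c7,c8,c9] : List Char).reverse = [c9,c8,c7,c6,c5] := by simp
    have hpal : ([c0,c1,c2,c3,c4] = [c9,c8,c7,c6,c5]) ↔
        ([c0,c1,c2,c3,c4,c5,c6,c7,c8,c9] = [c9,c8,c7,c6,c5,c4,c3,c2,c1,c0]) := by
      simp only [List.cons.injEq, and_true]
      constructor
      · rintro ⟨e0, e1, e2, e3, e4⟩
        exact ⟨e0, e1, e2, e3, e4, e4.symm, e3.symm, e2.symm, e1.symm, e0.symm⟩
      · rintro ⟨e0, e1, e2, e3, e4, _, _, _, _, _⟩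
        exact ⟨e0, e1, e2, e3, e4⟩
    have hr : PySem.List.pyRange 10 0 (-1) = ([10,9,8,7,6,5,4,3,2,1] : List Int) := by decide
    unfold is_valid_nhs_number_old is_valid_nhs_number_old_alt pvCalculateCheckDigit
    rw [if_neg hs0, if_neg hC, if_neg hC, hS1, hS2, hS9, hG, hrl, hl, hr]
    by_cases hp : pc = true ∧ [c0,c1,c2,c3,c4] = [c9,c8,c7,c6,c5]
    · rw [if_pos hp, if_pos (show pc = true ∧ some s = PySem.Str.slice? s none none (-1) from
        ⟨hp.1, hseq.mpr (hpal.mp hp.2)⟩)]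
    · rw [if_neg hp, if_neg (show ¬ (pc = true ∧ some s = PySem.Str.slice? s none none (-1)) from
        fun h => hp ⟨h.1, hpal.mpr (hseq.mp h.2)⟩)]
      simp only [pvNhsWeightings, pvDigitInt, List.zip_cons_cons, List.zip_nil_right,
        List.map_cons, List.map_nil, List.sum_cons, List.sum_nil, mod11]
      split_ifs <;> rw [Bool.eq_iff_iff] <;>
        simp only [beq_iff_eq, Bool.false_eq_true, false_iff] <;> omega

-- ===== VERDICT (by name: the statement is the Claim_ definition above) =====
theorem is_valid_nhs_number_old_spec : Claim_equal_is_valid_nhs_number_old := by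
  intro nhs_num palindrome_check _
  unfold Spec_is_valid_nhs_number_old
  exact pvMain nhs_num palindrome_check
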